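-- pv_equiv track=rewrite | github.com/wenzeyang1999-maker/toronto-chinese-services | scripts/generate_opium_qr.py | in_finder
-- ===== SOURCE A (Python) =====
-- def in_finder(row: int, col: int, n: int) -> bool:
--     blocks = [(0, 0), (0, n - 7), (n - 7, 0)]
--     for r0, c0 in blocks:
--         if r0 <= row < r0 + 7 and c0 <= col < c0 + 7:
--             return True
--         if r0 - 1 <= row < r0 + 8 and c0 - 1 <= col < c0 + 8:
--             return True
--     return False
-- ===== SOURCE B (Python) =====
-- _TABLE = ((True, True, False),
--           (True, False, False),
--           (False, False, False))
--
--
-- def _band(x: int, n: int) -> int: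
--     if -1 <= x < 8:
--         return 0
--     if n - 8 <= x < n + 1:
--         return 1
--     return 2
--
--
-- def in_finder(row: int, col: int, n: int) -> bool:
--     return _TABLE[_band(row, n)][_band(col, n)]
-- ===== Notes on version B (the rewrite author's own statement) =====
-- stated objective: alternative
-- what changed: Replaces the loop over corner-rectangle membership tests (with a redundant inner 7x7 check) by a per-axis band classifier (0=top/left,1=bottom/right,2=outside, first band wins) whose two indices select the answer from a 3x3 truth table encoding the missing bottom-right finder.
import Mathlib
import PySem

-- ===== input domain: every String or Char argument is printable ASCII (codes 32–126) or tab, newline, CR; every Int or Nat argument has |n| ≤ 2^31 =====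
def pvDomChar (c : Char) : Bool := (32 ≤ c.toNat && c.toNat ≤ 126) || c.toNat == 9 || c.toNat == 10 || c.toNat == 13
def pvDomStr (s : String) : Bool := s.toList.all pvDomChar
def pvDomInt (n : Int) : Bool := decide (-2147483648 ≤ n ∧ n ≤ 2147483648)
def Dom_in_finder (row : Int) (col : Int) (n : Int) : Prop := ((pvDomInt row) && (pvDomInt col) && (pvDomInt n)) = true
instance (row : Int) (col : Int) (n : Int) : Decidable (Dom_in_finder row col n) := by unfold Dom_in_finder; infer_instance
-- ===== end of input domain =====

-- B replaces A's loop over corner-rectangle tests by a per-axis band classifier indexing a 3x3 truth table; objective: alternative.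

-- ===== PORT A =====
-- literal port of A: loop over the three block origins, two range checks per block
def in_finder_loop (row col : Int) : List (Int × Int) → Bool
  | [] => false
  | (r0, c0) :: rest =>
      if (r0 ≤ row ∧ row < r0 + 7) ∧ (c0 ≤ col ∧ col < c0 + 7) then true
      else if (r0 - 1 ≤ row ∧ row < r0 + 8) ∧ (c0 - 1 ≤ col ∧ col < c0 + 8) then true
      else in_finder_loop row col rest

def in_finder (row : Int) (col : Int) (n : Int) : Bool :=
  in_finder_loop row col [(0, 0), (0, n - 7), (n - 7, 0)]

-- ===== PORT B =====
-- B: classify each axis into a band index (top/left wins on overlap), look up a 3x3 table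
def pv_table : List (List Bool) :=
  [[true, true, false], [true, false, false], [false, false, false]]

def pv_band (x n : Int) : Nat :=
  if -1 ≤ x ∧ x < 8 then 0
  else if n - 8 ≤ x ∧ x < n + 1 then 1
  else 2

def in_finder_alt (row : Int) (col : Int) (n : Int) : Bool :=
  ((pv_table.getD (pv_band row n) []).getD (pv_band col n) false)

-- ===== PRECONDITION & SPEC =====
def Spec_in_finder (row : Int) (col : Int) (n : Int) (out : Bool) : Prop := out = in_finder_alt row col n
instance (row : Int) (col : Int) (n : Int) (out : Bool) : Decidable (Spec_in_finder row col n out) := by unfold Spec_in_finder; infer_instance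

-- ===== CLAIM (what is proved, stated in full; the proofs are below) =====
def Claim_equal_in_finder : Prop := ∀ (row : Int) (col : Int) (n : Int), Dom_in_finder row col n → Spec_in_finder row col n (in_finder row col n)

-- ===== LEMMAS AND PROOFS =====

-- ===== VERDICT (by name: the statement is the Claim_ definition above) =====
theorem in_finder_spec : Claim_equal_in_finder := by
  intro row col n _
  unfold Spec_in_finder in_finder in_finder_alt pv_band pv_table
  simp only [in_finder_loop]
  split_ifs <;> simp only [List.getD] <;> first | rfl | omega
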